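-- pv_equiv track=rewrite | github.com/cherryyjuicee/pythonProject1 | main.py | delete_Zero1
-- ===== SOURCE A (Python) =====
-- def delete_Zero1(m):
--     k = 0
--     a = []
--     for i in range(len(m[1])):
--         for j in range(len(m)):
--             if m[j][i] == 0:
--                 k += 1
--         if k != len(m):
--             a.append(i)
--         k = 0
--     return a
-- ===== SOURCE B (Python) =====
-- def delete_Zero1(m):
--     ncols = len(m[1])
--     flags = [False] * ncols
--     for row in m:
--         for i in range(ncols):
--             if row[i] != 0:
--                 flags[i] = True
--     return [i for i, f in enumerate(flags) if f]
-- ===== Notes on version B (the rewrite author's own statement) =====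
-- stated objective: alternative
-- what changed: Replaces A's column-major scan that counts zeros per column with a row-major single pass maintaining a boolean flags array (flags[i] set when a nonzero is seen in column i), then emitting the indices of set flags via enumerate.
import Mathlib
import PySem

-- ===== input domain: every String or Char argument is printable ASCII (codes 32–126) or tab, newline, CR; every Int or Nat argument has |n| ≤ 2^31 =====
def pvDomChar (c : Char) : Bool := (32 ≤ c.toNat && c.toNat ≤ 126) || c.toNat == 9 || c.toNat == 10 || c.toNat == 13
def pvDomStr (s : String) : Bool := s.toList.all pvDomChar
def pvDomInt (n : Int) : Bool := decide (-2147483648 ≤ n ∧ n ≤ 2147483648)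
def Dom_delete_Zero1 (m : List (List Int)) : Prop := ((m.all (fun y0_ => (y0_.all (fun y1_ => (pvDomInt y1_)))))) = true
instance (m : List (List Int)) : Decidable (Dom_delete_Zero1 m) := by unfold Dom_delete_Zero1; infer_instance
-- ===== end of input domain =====

-- B replaces A's column-major count-zeros-per-column scan by a row-major single pass over
-- the rows maintaining a boolean flags array per column, then emits the set indices
-- (objective: alternative; same asymptotic cost).
-- ===== PORT A =====
def delete_Zero1 (m : List (List Int)) : List Int :=
  let n1 := (m.getD 1 []).length
  (List.range n1).foldl (fun a i =>
    let k : Int := (List.range m.length).foldl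
      (fun k j => if (m.getD j []).getD i 0 = 0 then k + 1 else k) 0
    if k != (m.length : Int) then a ++ [(i : Int)] else a) []

-- ===== PORT B =====
def delete_Zero1_alt (m : List (List Int)) : List Int :=
  let ncols := (m.getD 1 []).length
  let flags := m.foldl (fun fl row =>
    (List.range ncols).foldl (fun fl i => if row.getD i 0 != 0 then fl.set i true else fl) fl)
    (List.replicate ncols false)
  ((PySem.List.enumerate flags).filter (fun p => p.2)).map (fun p => p.1)

-- ===== PRECONDITION & SPEC =====
-- Pre_ excludes exactly the inputs where Python A raises IndexError: matrices with fewer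
-- than two rows (len(m[1]) indexes m[1]) and ragged matrices with a row shorter than
-- len(m[1]) (m[j][i] indexes that row at every column i < len(m[1])).
def Pre_delete_Zero1 (m : List (List Int)) : Prop :=
  2 ≤ m.length ∧ ∀ row ∈ m, (m.getD 1 []).length ≤ row.length
instance (m : List (List Int)) : Decidable (Pre_delete_Zero1 m) := by
  unfold Pre_delete_Zero1; infer_instance
def pvWitness_delete_Zero1 : List (List Int) := [[0, 1], [1, 0]]
def Spec_delete_Zero1 (m : List (List Int)) (out : List Int) : Prop := out = delete_Zero1_alt m
instance (m : List (List Int)) (out : List Int) : Decidable (Spec_delete_Zero1 m out) := by unfold Spec_delete_Zero1; infer_instance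

-- ===== CLAIM (what is proved, stated in full; the proofs are below) =====
def Claim_equal_delete_Zero1 : Prop := ∀ (m : List (List Int)), Dom_delete_Zero1 m → Pre_delete_Zero1 m → Spec_delete_Zero1 m (delete_Zero1 m)

-- ===== LEMMAS AND PROOFS =====

-- `colNZ m i` = column i of m contains a nonzero entry; both sides are reduced to it.
def colNZ (m : List (List Int)) (i : Nat) : Bool := m.any (fun row => row.getD i 0 != 0)

-- A's inner loop is a counter: it computes the number of indices j < n satisfying f.
theorem count_fold (f : Nat → Prop) [DecidablePred f] (n : Nat) :
    (List.range n).foldl (fun (k : Int) j => if f j then k + 1 else k) 0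
      = ((List.range n).countP (fun j => decide (f j)) : Int) := by
  induction n with
  | zero => simp
  | succ n ih =>
    simp [List.range_succ, List.countP_append, ih]
    split <;> simp_all

-- "the counter of f over range n differs from n" is exactly "some j < n fails f".
theorem key (f : Nat → Prop) [DecidablePred f] (g : Nat → Bool)
    (hg : ∀ j, g j = true ↔ ¬ f j) (n : Nat) :
    (((List.range n).foldl (fun (k : Int) j => if f j then k + 1 else k) 0) != (n : Int))
      = (List.range n).any g := by
  rw [count_fold]
  have hle : (List.range n).countP (fun j => decide (f j)) ≤ n := by
    simpa using List.countP_le_length (p := fun j => decide (f j)) (l := List.range n)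
  cases hq : (List.range n).any g with
  | true =>
    obtain ⟨j, hj, hcj⟩ := List.any_eq_true.mp hq
    have hne : (List.range n).countP (fun j => decide (f j)) ≠ n := by
      intro h
      have := List.countP_eq_length.mp (by simpa using h) j hj
      exact (hg j).mp hcj (by simpa using this)
    rw [bne_iff_ne]
    exact fun h => hne (by exact_mod_cast h)
  | false =>
    have hall : ∀ j ∈ List.range n, decide (f j) = true := by
      intro j hj
      have := List.any_eq_false.mp hq j hj
      simpa using not_not.mp (fun hf => this ((hg j).mpr hf))
    have hcl : (List.range n).countP (fun j => decide (f j)) = (List.range n).length :=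
      List.countP_eq_length.mpr hall
    rw [List.length_range] at hcl
    rw [hcl, bne_self_eq_false]

-- any over row indices = any over the rows themselves
theorem range_any (l : List (List Int)) (g : List Int → Bool) :
    (List.range l.length).any (fun j => g (l.getD j [])) = l.any g := by
  cases hq : l.any g with
  | true =>
    obtain ⟨row, hrow, hg⟩ := List.any_eq_true.mp hq
    obtain ⟨j, hj, rfl⟩ := List.getElem_of_mem hrow
    refine List.any_eq_true.mpr ⟨j, List.mem_range.mpr hj, ?_⟩
    simpa [List.getD_eq_getElem?_getD, List.getElem?_eq_getElem hj] using hg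
  | false =>
    refine List.any_eq_false.mpr ?_
    intro j hj
    have hj' := List.mem_range.mp hj
    have := List.any_eq_false.mp hq (l.getD j []) (by
      simpa [List.getD_eq_getElem?_getD, List.getElem?_eq_getElem hj'] using
        List.getElem_mem hj')
    exact this

-- A as a filter of the column indices
theorem Aform (m : List (List Int)) :
    delete_Zero1 m
      = ((List.range (m.getD 1 []).length).filter (colNZ m)).map (fun (i : Nat) => (i : Int)) := by
  unfold delete_Zero1
  have hcond : ∀ i : Nat,
      ((((List.range m.length).foldl
          (fun (k : Int) j => if (m.getD j []).getD i 0 = 0 then k + 1 else k) 0)) != (m.length : Int))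
        = colNZ m i := by
    intro i
    rw [key (fun j => (m.getD j []).getD i 0 = 0)
          (fun j => (m.getD j []).getD i 0 != 0) (fun j => by simp) m.length]
    exact range_any m (fun row => row.getD i 0 != 0)
  simp only [hcond]
  induction (List.range (m.getD 1 []).length) using List.reverseRecOn with
  | nil => simp
  | append_singleton xs x ih =>
    rw [List.foldl_append, ih]
    simp only [List.foldl_cons, List.foldl_nil, List.filter_append, List.map_append]
    by_cases h : colNZ m x = true
    · simp [h]
    · simp [h]

-- the inner flag-setting fold: length preserved
theorem inner_len (row : List Int) (idxs : List Nat) (fl : List Bool) :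
    (idxs.foldl (fun fl i => if row.getD i 0 != 0 then fl.set i true else fl) fl).length
      = fl.length := by
  induction idxs generalizing fl with
  | nil => rfl
  | cons j js ih =>
    simp only [List.foldl_cons]
    rw [ih]
    split <;> simp

-- the inner fold ORs (row has nonzero at i) into flag i, for i within bounds
theorem inner_getD (row : List Int) (idxs : List Nat) (fl : List Bool) (i : Nat)
    (hi : i < fl.length) :
    (idxs.foldl (fun fl i => if row.getD i 0 != 0 then fl.set i true else fl) fl).getD i false
      = (fl.getD i false || (idxs.any (fun j => j == i) && (row.getD i 0 != 0))) := by
  induction idxs generalizing fl with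
  | nil => simp
  | cons j js ih =>
    simp only [List.foldl_cons, List.any_cons]
    by_cases hc : row.getD j 0 != 0
    · rw [if_pos hc]
      rw [ih _ (by simpa using hi)]
      by_cases hji : j = i
      · subst hji
        simp only [bne_iff_ne, ne_eq, List.getD_eq_getElem?_getD] at hc
        simp [List.getD_eq_getElem?_getD, hi]
        exact Or.inr hc
      · have heq : (fl.set j true).getD i false = fl.getD i false := by
          simp [List.getD_eq_getElem?_getD, List.getElem?_set_ne hji]
        rw [heq]
        have hb : (j == i) = false := by simp [hji]
        rw [hb]
        simp
    · rw [if_neg hc]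
      rw [ih _ hi]
      by_cases hji : j = i
      · subst hji; simp_all
      · have hb : (j == i) = false := by simp [hji]
        rw [hb]
        simp

-- the outer fold over rows: flag i = some row seen so far has a nonzero at column i
theorem outer_getD (n : Nat) (rows : List (List Int)) (fl : List Bool) (i : Nat)
    (hlen : fl.length = n) (hi : i < n) :
    (rows.foldl (fun fl row =>
        (List.range n).foldl (fun fl i => if row.getD i 0 != 0 then fl.set i true else fl) fl)
      fl).getD i false
      = (fl.getD i false || rows.any (fun row => row.getD i 0 != 0)) := by
  induction rows generalizing fl with
  | nil => simp
  | cons r rs ih =>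
    simp only [List.foldl_cons, List.any_cons]
    rw [ih _ (by rw [inner_len]; exact hlen)]
    rw [inner_getD r _ _ _ (by omega)]
    have : (List.range n).any (fun j => j == i) = true :=
      List.any_eq_true.mpr ⟨i, List.mem_range.mpr hi, by simp⟩
    rw [this]
    simp [Bool.or_assoc]

theorem outer_len (n : Nat) (rows : List (List Int)) (fl : List Bool) :
    (rows.foldl (fun fl row =>
        (List.range n).foldl (fun fl i => if row.getD i 0 != 0 then fl.set i true else fl) fl)
      fl).length = fl.length := by
  induction rows generalizing fl with
  | nil => rfl
  | cons r rs ih => simp only [List.foldl_cons]; rw [ih, inner_len]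

-- index-range forms of the emitted list, cons cases
theorem Rfalse (bs : List Bool) (s : Int) :
    ((List.range (false :: bs).length).filter (fun i => (false :: bs).getD i false)).map
          (fun (i : Nat) => s + (i : Int))
        = ((List.range bs.length).filter (fun i => bs.getD i false)).map
                (fun (i : Nat) => (s + 1) + (i : Int)) := by
  rw [List.length_cons, List.range_succ_eq_map, List.filter_cons]
  simp only [List.getD_cons_zero, Bool.false_eq_true, if_false]
  rw [List.filter_map, List.map_map]
  have hq : ((fun i => (false :: bs).getD i false) ∘ Nat.succ) = (fun i => bs.getD i false) := by
    funext i; simp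
  rw [hq]
  exact List.map_congr_left (fun i _ => by simp [Function.comp]; ring)

theorem Rtrue (bs : List Bool) (s : Int) :
    ((List.range (true :: bs).length).filter (fun i => (true :: bs).getD i false)).map
          (fun (i : Nat) => s + (i : Int))
        = [s] ++ ((List.range bs.length).filter (fun i => bs.getD i false)).map
                (fun (i : Nat) => (s + 1) + (i : Int)) := by
  rw [List.length_cons, List.range_succ_eq_map, List.filter_cons]
  simp only [List.getD_cons_zero, if_true, List.map_cons]
  rw [List.filter_map, List.map_map]
  have hq : ((fun i => (true :: bs).getD i false) ∘ Nat.succ) = (fun i => bs.getD i false) := by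
    funext i; simp
  rw [hq]
  simp only [Nat.cast_zero, add_zero, List.singleton_append]
  refine List.cons_eq_cons.mpr ⟨rfl, ?_⟩
  exact List.map_congr_left (fun i _ => by simp [Function.comp]; ring)

-- emitting the indices of set flags = filtering the index range by the flag values
theorem enum_filter (flags : List Bool) (s : Int) :
    ((PySem.List.enumerate flags s).filter (fun p => p.2)).map (fun p => p.1)
      = ((List.range flags.length).filter (fun i => flags.getD i false)).map
          (fun (i : Nat) => s + (i : Int)) := by
  induction flags generalizing s with
  | nil => simp [PySem.List.enumerate_nil]
  | cons b bs ih =>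
    have L : ((PySem.List.enumerate (b :: bs) s).filter (fun p => p.2)).map (fun p => p.1)
        = (if b then [s] else [])
            ++ ((PySem.List.enumerate bs (s + 1)).filter (fun p => p.2)).map (fun p => p.1) := by
      rw [PySem.List.enumerate_cons]
      cases b <;> simp
    rw [L, ih (s + 1)]
    cases b with
    | false => rw [Rfalse bs s]; simp
    | true => rw [Rtrue bs s]; simp

-- B as a filter of the column indices
theorem Bform (m : List (List Int)) :
    delete_Zero1_alt m
      = ((List.range (m.getD 1 []).length).filter (colNZ m)).map (fun (i : Nat) => (i : Int)) := by
  unfold delete_Zero1_alt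
  set n := (m.getD 1 []).length with hn
  set flags := m.foldl (fun fl row =>
      (List.range n).foldl (fun fl i => if row.getD i 0 != 0 then fl.set i true else fl) fl)
      (List.replicate n false) with hflags
  have hlen : flags.length = n := by rw [hflags, outer_len]; simp
  rw [enum_filter flags 0, hlen]
  have hfc : ∀ i ∈ List.range n, (flags.getD i false) = colNZ m i := by
    intro i hi
    rw [hflags, outer_getD n m (List.replicate n false) i (by simp) (List.mem_range.mp hi)]
    simp [colNZ, List.getD_eq_getElem?_getD]
  rw [List.filter_congr hfc]
  simp

theorem delete_Zero1_eq_alt (m : List (List Int)) : delete_Zero1 m = delete_Zero1_alt m := by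
  rw [Aform, Bform]

-- ===== VERDICT (by name: the statement is the Claim_ definition above) =====
theorem delete_Zero1_spec : Claim_equal_delete_Zero1 := by
  intro m _ _
  exact delete_Zero1_eq_alt m
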